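-- pv_equiv track=rewrite | github.com/rwth-i6/returnn | better_exchook.py | parse_py_statement
-- ===== SOURCE A (Python) =====
-- def parse_py_statement(line):
--     """
--     :param str line:
--     :return: yields (type, value)
--     :rtype: typing.Iterator[typing.Tuple[str,str]]
--     """
--     state = 0
--     cur_token = ""
--     spaces = " \t\n"
--     ops = ".,;:+-*/%&!=|(){}[]^<>"
--     i = 0
--
--     def _escape_char(_c):
--         if _c == "n":
--             return "\n"
--         elif _c == "t":
--             return "\t"
--         else:
--             return _c
--
--     while i < len(line):
--         c = line[i]
--         i += 1
--         if state == 0: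
--             if c in spaces:
--                 pass
--             elif c in ops:
--                 yield ("op", c)
--             elif c == "#":
--                 state = 6
--             elif c == "\"":
--                 state = 1
--             elif c == "'":
--                 state = 2
--             else:
--                 cur_token = c
--                 state = 3
--         elif state == 1:  # string via "
--             if c == "\\":
--                 state = 4
--             elif c == "\"":
--                 yield ("str", cur_token)
--                 cur_token = ""
--                 state = 0
--             else:
--                 cur_token += c
--         elif state == 2:  # string via '
--             if c == "\\":
--                 state = 5
--             elif c == "'":
--                 yield ("str", cur_token)
--                 cur_token = ""
--                 state = 0
--             else:
--                 cur_token += c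
--         elif state == 3:  # identifier
--             if c in spaces + ops + "#\"'":
--                 yield ("id", cur_token)
--                 cur_token = ""
--                 state = 0
--                 i -= 1
--             else:
--                 cur_token += c
--         elif state == 4:  # escape in "
--             cur_token += _escape_char(c)
--             state = 1
--         elif state == 5:  # escape in '
--             cur_token += _escape_char(c)
--             state = 2
--         elif state == 6:  # comment
--             cur_token += c
--     if state == 3:
--         yield ("id", cur_token)
--     elif state == 6:
--         yield ("comment", cur_token)
-- ===== SOURCE B (Python) =====
-- def parse_py_statement(line):
--     """Dispatch-style tokenizer: one while loop over an index that branches on the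
--     current char and consumes whole tokens (string/identifier/comment) in inner scans."""
--     spaces = " \t\n"
--     ops = ".,;:+-*/%&!=|(){}[]^<>"
--     stop = spaces + ops + "#\"'"
--
--     def _escape_char(_c):
--         if _c == "n":
--             return "\n"
--         elif _c == "t":
--             return "\t"
--         else:
--             return _c
--
--     n = len(line)
--     i = 0
--     while i < n:
--         c = line[i]
--         if c in spaces:
--             i += 1
--         elif c in ops:
--             yield ("op", c)
--             i += 1
--         elif c == "#":
--             yield ("comment", line[i + 1:])
--             return
--         elif c in "\"'":
--             q = c
--             i += 1
--             buf = ""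
--             while i < n:
--                 d = line[i]
--                 if d == "\\":
--                     if i + 1 >= n:
--                         return
--                     buf += _escape_char(line[i + 1])
--                     i += 2
--                 elif d == q:
--                     yield ("str", buf)
--                     i += 1
--                     break
--                 else:
--                     buf += d
--                     i += 1
--             else:
--                 return
--         else:
--             buf = c
--             i += 1
--             while i < n and line[i] not in stop:
--                 buf += line[i]
--                 i += 1
--             yield ("id", buf)
-- ===== Notes on version B (the rewrite author's own statement) =====
-- stated objective: alternative
-- what changed: Replaces A's one-char-at-a-time state-machine (explicit numeric state, re-pushed input on identifier end, end-of-input state flush) by a dispatch-style tokenizer: a single index loop that branches on the current char and consumes each whole token (op, comment tail, quoted string with escapes, identifier run) with a dedicated inner scan.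
import Mathlib
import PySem

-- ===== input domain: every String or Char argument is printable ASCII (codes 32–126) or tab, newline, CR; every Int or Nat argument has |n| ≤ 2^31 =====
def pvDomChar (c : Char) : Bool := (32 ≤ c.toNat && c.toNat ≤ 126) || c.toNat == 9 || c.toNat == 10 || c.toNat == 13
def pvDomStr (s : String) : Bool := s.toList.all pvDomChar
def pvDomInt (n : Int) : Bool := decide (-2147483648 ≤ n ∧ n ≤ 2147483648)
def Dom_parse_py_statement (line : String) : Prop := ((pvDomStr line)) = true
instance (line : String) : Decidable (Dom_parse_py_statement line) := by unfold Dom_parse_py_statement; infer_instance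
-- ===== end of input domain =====

-- B replaces A's numeric-state machine by a dispatch-style tokenizer that consumes
-- a whole token per branch (objective: alternative decomposition, same O(n) cost).

-- ===== PORT A =====
def pvSpaces : List Char := [' ', '\t', '\n']
def pvOps : List Char :=
  ['.', ',', ';', ':', '+', '-', '*', '/', '%', '&', '!', '=', '|',
   '(', ')', '{', '}', '[', ']', '^', '<', '>']
def pvEscapeChar (c : Char) : Char :=
  if c == 'n' then '\n' else if c == 't' then '\t' else c
-- membership in "spaces + ops + '#\"\''" (A's state-3 test; also B's identifier stop set)
def pvStop (c : Char) : Bool :=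
  pvSpaces.contains c || pvOps.contains c || c == '#' || c == '"' || c == '\''

-- A's while loop, one char per step over the numeric state; `i -= 1` becomes re-consuming `c :: rest`.
def pvALoop (cs : List Char) (state : Nat) (cur : List Char) : List (String × String) :=
  match cs with
  | [] =>
    if state == 3 then [("id", String.ofList cur)]
    else if state == 6 then [("comment", String.ofList cur)]
    else []
  | c :: rest =>
    if state == 0 then
      if pvSpaces.contains c then pvALoop rest 0 cur
      else if pvOps.contains c then ("op", String.ofList [c]) :: pvALoop rest 0 cur
      else if c == '#' then pvALoop rest 6 cur
      else if c == '"' then pvALoop rest 1 cur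
      else if c == '\'' then pvALoop rest 2 cur
      else pvALoop rest 3 [c]
    else if state == 1 then
      if c == '\\' then pvALoop rest 4 cur
      else if c == '"' then ("str", String.ofList cur) :: pvALoop rest 0 []
      else pvALoop rest 1 (cur ++ [c])
    else if state == 2 then
      if c == '\\' then pvALoop rest 5 cur
      else if c == '\'' then ("str", String.ofList cur) :: pvALoop rest 0 []
      else pvALoop rest 2 (cur ++ [c])
    else if state == 3 then
      if pvStop c then ("id", String.ofList cur) :: pvALoop (c :: rest) 0 []
      else pvALoop rest 3 (cur ++ [c])
    else if state == 4 then pvALoop rest 1 (cur ++ [pvEscapeChar c])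
    else if state == 5 then pvALoop rest 2 (cur ++ [pvEscapeChar c])
    else pvALoop rest 6 (cur ++ [c])
termination_by (2 * cs.length + (if state == 3 then 1 else 0))
decreasing_by all_goals (simp_all; try omega)

def parse_py_statement (line : String) : List (String × String) :=
  pvALoop line.toList 0 []

-- ===== PORT B =====
-- B's inner string scan: consume up to and including the closing quote `q`,
-- returning the accumulated contents and the remainder; none = unterminated.
def pvScanStr (q : Char) (cs : List Char) (buf : List Char) :
    Option (List Char × List Char) :=
  match cs with
  | [] => none
  | c :: rest =>
    if c == '\\' then
      match rest with
      | [] => none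
      | d :: rest' => pvScanStr q rest' (buf ++ [pvEscapeChar d])
    else if c == q then some (buf, rest)
    else pvScanStr q rest (buf ++ [c])

-- needed by pvBLoop's termination proof
theorem pvScanStr_length (q : Char) (cs : List Char) :
    ∀ buf s r, pvScanStr q cs buf = some (s, r) → r.length < cs.length :=
  match cs with
  | [] => by simp [pvScanStr]
  | c :: rest => by
    intro buf s r h
    by_cases hb : c == '\\'
    · cases rest with
      | nil => rw [pvScanStr.eq_def] at h; simp [hb] at h
      | cons d rest' =>
        rw [pvScanStr.eq_def] at h; simp only [hb, if_true] at h
        have := pvScanStr_length q rest' _ _ _ h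
        simp at this ⊢; omega
    · by_cases hq : c == q
      · rw [pvScanStr.eq_def] at h; simp [hb, hq] at h
        obtain ⟨-, h2⟩ := h
        subst h2; simp
      · rw [pvScanStr.eq_def] at h
        simp only [hb, hq, Bool.false_eq_true, if_false] at h
        have := pvScanStr_length q rest _ _ _ h
        simp at this ⊢; omega
termination_by cs.length
decreasing_by all_goals (simp; try omega)

-- B's main dispatch loop: branch on the head char, consume one whole token per branch.
def pvBLoop (cs : List Char) : List (String × String) :=
  match cs with
  | [] => []
  | c :: rest =>
    if pvSpaces.contains c then pvBLoop rest
    else if pvOps.contains c then ("op", String.ofList [c]) :: pvBLoop rest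
    else if c == '#' then [("comment", String.ofList rest)]
    else if c == '"' || c == '\'' then
      match h : pvScanStr c rest [] with
      | some (s, rest') => ("str", String.ofList s) :: pvBLoop rest'
      | none => []
    else
      ("id", String.ofList (c :: rest.takeWhile (fun d => !pvStop d))) ::
        pvBLoop (rest.dropWhile (fun d => !pvStop d))
termination_by cs.length
decreasing_by
  · simp
  · simp
  · have := pvScanStr_length c rest [] _ _ h; simp; omega
  · have := List.length_dropWhile_le (l := rest) (p := fun d => !pvStop d)
    simp at this ⊢; omega

def parse_py_statement_alt (line : String) : List (String × String) :=
  pvBLoop line.toList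

-- ===== PRECONDITION & SPEC =====
def Spec_parse_py_statement (line : String) (out : List (String × String)) : Prop := out = parse_py_statement_alt line
instance (line : String) (out : List (String × String)) : Decidable (Spec_parse_py_statement line out) := by unfold Spec_parse_py_statement; infer_instance

-- ===== CLAIM (what is proved, stated in full; the proofs are below) =====
def Claim_equal_parse_py_statement : Prop := ∀ (line : String), Dom_parse_py_statement line → Spec_parse_py_statement line (parse_py_statement line)

-- ===== LEMMAS AND PROOFS =====

-- what B does after an opening quote q, as a function of A's accumulated token
def pvStrCont (q : Char) (cs tok : List Char) : List (String × String) :=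
  match pvScanStr q cs tok with
  | some (s, r) => ("str", String.ofList s) :: pvBLoop r
  | none => []

theorem pvALoop_nil (st : Nat) (tok : List Char) : pvALoop [] st tok =
    (if st == 3 then [("id", String.ofList tok)]
     else if st == 6 then [("comment", String.ofList tok)] else []) := by
  rw [pvALoop.eq_def]

-- A in comment state just collects the rest of the line
theorem pvComment (cs : List Char) : ∀ tok : List Char,
    pvALoop cs 6 tok = [("comment", String.ofList (tok ++ cs))] := by
  induction cs with
  | nil => intro tok; simp [pvALoop_nil]
  | cons c rest ih =>
    intro tok
    rw [pvALoop.eq_def]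
    simp [ih (tok ++ [c])]

-- the combined invariant: A's states 0/1/2/3 against B's dispatch loop
theorem pvMain (n : Nat) : ∀ cs : List Char, cs.length ≤ n →
    (pvALoop cs 0 [] = pvBLoop cs) ∧
    (∀ tok, pvALoop cs 1 tok = pvStrCont '"' cs tok) ∧
    (∀ tok, pvALoop cs 2 tok = pvStrCont '\'' cs tok) ∧
    (∀ tok, pvALoop cs 3 tok =
      ("id", String.ofList (tok ++ cs.takeWhile (fun d => !pvStop d))) ::
        pvBLoop (cs.dropWhile (fun d => !pvStop d))) := by
  induction n with
  | zero =>
    intro cs h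
    have hnil : cs = [] := by cases cs <;> simp_all
    subst hnil
    refine ⟨?_, ?_, ?_, ?_⟩ <;> simp [pvALoop, pvBLoop, pvStrCont, pvScanStr]
  | succ n ih =>
    intro cs hlen
    cases cs with
    | nil =>
      refine ⟨?_, ?_, ?_, ?_⟩ <;> simp [pvALoop, pvBLoop, pvStrCont, pvScanStr]
    | cons c rest =>
      have hr : rest.length ≤ n := by simp at hlen; omega
      obtain ⟨ih1, ih2, ih2', ih3⟩ := ih rest hr
      -- state 1 (string via ") at c :: rest
      have h2a : ∀ tok, pvALoop (c :: rest) 1 tok = pvStrCont '"' (c :: rest) tok := by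
        intro tok
        by_cases hb : c == '\\'
        · rw [pvALoop.eq_def]
          simp only [hb, if_true, Nat.reduceBEq, Bool.false_eq_true, if_false]
          cases rest with
          | nil =>
            rw [pvALoop_nil]
            simp only [pvStrCont]
            rw [pvScanStr.eq_def]
            simp [hb]
          | cons d rest' =>
            rw [pvALoop.eq_def]
            simp only [Nat.reduceBEq, Bool.false_eq_true, if_false, if_true]
            have hr' : rest'.length ≤ n := by simp at hr ⊢; omega
            obtain ⟨-, ihq, -, -⟩ := ih rest' hr'
            rw [ihq (tok ++ [pvEscapeChar d])]
            simp only [pvStrCont]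
            conv_rhs => rw [pvScanStr.eq_def]
            simp [hb]
        · by_cases hq : c == '"'
          · rw [pvALoop.eq_def]
            simp only [hb, hq, Nat.reduceBEq, Bool.false_eq_true, if_false, if_true]
            simp only [pvStrCont]
            rw [pvScanStr.eq_def]
            simp [hb, hq, ih1]
          · rw [pvALoop.eq_def]
            simp only [hb, hq, Nat.reduceBEq, Bool.false_eq_true, if_false, if_true]
            rw [ih2 (tok ++ [c])]
            simp only [pvStrCont]
            conv_rhs => rw [pvScanStr.eq_def]
            simp [hb, hq]
      -- state 2 (string via ') at c :: rest
      have h2b : ∀ tok, pvALoop (c :: rest) 2 tok = pvStrCont '\'' (c :: rest) tok := by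
        intro tok
        by_cases hb : c == '\\'
        · rw [pvALoop.eq_def]
          simp only [hb, if_true, Nat.reduceBEq, Bool.false_eq_true, if_false]
          cases rest with
          | nil =>
            rw [pvALoop_nil]
            simp only [pvStrCont]
            rw [pvScanStr.eq_def]
            simp [hb]
          | cons d rest' =>
            rw [pvALoop.eq_def]
            simp only [Nat.reduceBEq, Bool.false_eq_true, if_false, if_true]
            have hr' : rest'.length ≤ n := by simp at hr ⊢; omega
            obtain ⟨-, -, ihq, -⟩ := ih rest' hr'
            rw [ihq (tok ++ [pvEscapeChar d])]
            simp only [pvStrCont]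
            conv_rhs => rw [pvScanStr.eq_def]
            simp [hb]
        · by_cases hq : c == '\''
          · rw [pvALoop.eq_def]
            simp only [hb, hq, Nat.reduceBEq, Bool.false_eq_true, if_false, if_true]
            simp only [pvStrCont]
            rw [pvScanStr.eq_def]
            simp [hb, hq, ih1]
          · rw [pvALoop.eq_def]
            simp only [hb, hq, Nat.reduceBEq, Bool.false_eq_true, if_false, if_true]
            rw [ih2' (tok ++ [c])]
            simp only [pvStrCont]
            conv_rhs => rw [pvScanStr.eq_def]
            simp [hb, hq]
      -- state 0 at c :: rest
      have h1 : pvALoop (c :: rest) 0 [] = pvBLoop (c :: rest) := by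
        rw [pvALoop.eq_def, pvBLoop.eq_def]
        by_cases hs : c ∈ pvSpaces
        · simp [hs, ih1]
        · by_cases hop : c ∈ pvOps
          · simp [hs, hop, ih1]
          · by_cases hh : c = '#'
            · subst hh
              simp [pvSpaces, pvOps, pvComment rest []]
            · by_cases hdq : c = '"'
              · subst hdq
                simp [pvSpaces, pvOps, ih2]
                cases hsc : pvScanStr '"' rest [] with
                | none => simp [pvStrCont, hsc]
                | some p => cases p with | mk a b => simp [pvStrCont, hsc]
              · by_cases hsq : c = '\''
                · subst hsq
                  simp [pvSpaces, pvOps, ih2']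
                  cases hsc : pvScanStr '\'' rest [] with
                  | none => simp [pvStrCont, hsc]
                  | some p => cases p with | mk a b => simp [pvStrCont, hsc]
                · simp [hs, hop, hh, hdq, hsq, ih3]
      -- state 3 (identifier) at c :: rest
      have h3 : ∀ tok, pvALoop (c :: rest) 3 tok =
          ("id", String.ofList (tok ++ (c :: rest).takeWhile (fun d => !pvStop d))) ::
            pvBLoop ((c :: rest).dropWhile (fun d => !pvStop d)) := by
        intro tok
        rw [pvALoop.eq_def]
        by_cases hstop : pvStop c
        · simp [hstop, h1]
        · simp only [hstop, Nat.reduceBEq, Bool.false_eq_true, if_false, if_true]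
          rw [ih3 (tok ++ [c])]
          simp [hstop]
      exact ⟨h1, h2a, h2b, h3⟩

-- ===== VERDICT (by name: the statement is the Claim_ definition above) =====
theorem parse_py_statement_spec : Claim_equal_parse_py_statement := by
  intro line _
  unfold Spec_parse_py_statement parse_py_statement parse_py_statement_alt
  exact (pvMain line.toList.length line.toList le_rfl).1
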